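-- pv_equiv track=rewrite | github.com/mehtasarang17/evidence-integrity-agent | backend/agents/teams_realtime.py | _count_by_key
-- ===== SOURCE A (Python) =====
-- from typing import Any, Dict, Iterable, List, Tuple
--
-- def _count_by_key(items: List[Any], key: str) -> Dict[str, int]:
--     counts: Dict[str, int] = {}
--     for item in items:
--         if not isinstance(item, dict):
--             continue
--         value = item.get(key)
--         if value in (None, "", [], {}):
--             continue
--         counts[str(value)] = counts.get(str(value), 0) + 1
--     return counts
-- ===== SOURCE B (Python) =====
-- def _count_by_key(items, key):
--     kept = [str(item.get(key)) for item in items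
--             if isinstance(item, dict) and item.get(key) not in (None, "", [], {})]
--
--     def group(vs):
--         if not vs:
--             return {}
--         head, rest = vs[0], vs[1:]
--         remaining = [w for w in rest if w != head]
--         result = {head: (len(rest) - len(remaining)) + 1}
--         result.update(group(remaining))
--         return result
--
--     return group(kept)
-- ===== Notes on version B (the rewrite author's own statement) =====
-- stated objective: alternative
-- what changed: Replaces A's single-pass incremental counter dict with a two-stage pipeline: first collect the kept stringified values, then group them by a recursive remove-and-count procedure (emit the head value with its total multiplicity computed from the length drop of filtering it out, recurse on the list with all its occurrences removed), which preserves first-occurrence order without any counter updates.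
import Mathlib
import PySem

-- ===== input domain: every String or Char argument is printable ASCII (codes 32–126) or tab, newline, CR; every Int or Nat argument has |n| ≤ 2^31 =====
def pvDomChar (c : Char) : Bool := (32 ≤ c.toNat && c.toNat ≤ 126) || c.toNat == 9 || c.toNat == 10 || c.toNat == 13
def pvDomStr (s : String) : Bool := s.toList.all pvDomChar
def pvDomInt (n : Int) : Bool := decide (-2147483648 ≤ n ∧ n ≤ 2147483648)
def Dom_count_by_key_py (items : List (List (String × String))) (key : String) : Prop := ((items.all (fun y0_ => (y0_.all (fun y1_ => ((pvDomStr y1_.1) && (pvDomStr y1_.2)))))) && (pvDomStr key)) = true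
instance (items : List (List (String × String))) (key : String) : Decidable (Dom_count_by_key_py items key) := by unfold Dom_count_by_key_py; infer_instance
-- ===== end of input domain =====

-- B replaces A's incremental counter dict with a recursive remove-and-count grouping over the kept values (objective: alternative, same result).

-- ===== PORT A =====
-- A: single pass, mutable counts dict: counts[str(value)] = counts.get(str(value), 0) + 1
-- (the 'isinstance(item, dict)' guard is vacuous under the type convention: every item IS a dict;
--  'value in (None, "", [], {})' on a str-valued dict is: value is none or "")
def count_by_key_py (items : List (List (String × String))) (key : String) : List (String × Int) :=
  (items.foldl (fun (counts : PySem.Dict String Int) item =>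
      match (PySem.Dict.mk item).get? key with
      | none => counts
      | some v => if v = "" then counts
                  else counts.insert v (counts.getD v 0 + 1))
    PySem.Dict.empty).items

-- ===== PORT B =====
-- B-side helper: the comprehension's filter (item.get(key) kept unless None/""/[]/{})
def pvKeptVal (key : String) (item : List (String × String)) : Option String :=
  match (PySem.Dict.mk item).get? key with
  | none => none
  | some v => if v = "" then none else some v

-- B's recursive group(vs): emit the head with its total multiplicity, recurse on the rest with it removed
def pvGroup : List String → List (String × Int)
  | [] => []
  | v :: rest =>
    let remaining := rest.filter (fun w => w ≠ v)
    (v, ((rest.length : Int) - remaining.length) + 1) :: pvGroup remaining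
termination_by l => l.length
decreasing_by
  simp only [List.length_unattach]
  exact Nat.lt_succ_of_le ((List.length_filter_le _ _).trans
    (Nat.le_of_eq List.length_attach))

def count_by_key_py_alt (items : List (List (String × String))) (key : String) : List (String × Int) :=
  pvGroup (items.filterMap (pvKeptVal key))

-- ===== PRECONDITION & SPEC =====
def Spec_count_by_key_py (items : List (List (String × String))) (key : String) (out : List (String × Int)) : Prop := out = count_by_key_py_alt items key
instance (items : List (List (String × String))) (key : String) (out : List (String × Int)) : Decidable (Spec_count_by_key_py items key out) := by unfold Spec_count_by_key_py; infer_instance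

-- ===== CLAIM (what is proved, stated in full; the proofs are below) =====
def Claim_equal_count_by_key_py : Prop := ∀ (items : List (List (String × String))) (key : String), Dom_count_by_key_py items key → Spec_count_by_key_py items key (count_by_key_py items key)

-- ===== LEMMAS AND PROOFS =====

-- A's loop, which skips items whose kept value is none, is the counter loop over the kept values.
theorem foldl_skip_eq_foldl_filterMap (key : String) (items : List (List (String × String)))
    (d : PySem.Dict String Int) :
    items.foldl (fun (counts : PySem.Dict String Int) item =>
        match (PySem.Dict.mk item).get? key with
        | none => counts
        | some v => if v = "" then counts
                    else counts.insert v (counts.getD v 0 + 1)) d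
      = (items.filterMap (pvKeptVal key)).foldl
          (fun counts v => counts.insert v (counts.getD v 0 + 1)) d := by
  induction items generalizing d with
  | nil => rfl
  | cons item t ih =>
    simp only [List.foldl_cons, List.filterMap_cons, pvKeptVal]
    cases h : (PySem.Dict.mk item).get? key with
    | none => simpa using ih d
    | some v =>
      by_cases hv : v = "" <;> simp [hv, ih, pvKeptVal]

-- Set.add past a head element it cannot equal
theorem pvAdd_cons (v x : String) (s : List String) (h : x ≠ v) :
    PySem.Set.add (v :: s) x = v :: PySem.Set.add s x := by
  simp [PySem.Set.add, PySem.Set.contains, h]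
  split <;> simp_all

-- folding Set.add over a list avoiding v commutes with a leading v
theorem pvFoldl_add_cons (l : List String) (v : String) (h : v ∉ l) :
    ∀ s, l.foldl PySem.Set.add (v :: s) = v :: l.foldl PySem.Set.add s := by
  induction l with
  | nil => intro s; rfl
  | cons x t ih =>
    intro s
    have hx : x ≠ v := by rintro rfl; exact h (List.mem_cons_self)
    have ht : v ∉ t := fun hv => h (List.mem_cons_of_mem _ hv)
    simp only [List.foldl_cons, pvAdd_cons v x s hx, ih ht]

-- occurrences of an element already in the accumulator are no-ops for Set.add
theorem pvFoldl_add_mem_filter (l : List String) (v : String) :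
    ∀ s, v ∈ s → l.foldl PySem.Set.add s = (l.filter (fun w => w ≠ v)).foldl PySem.Set.add s := by
  induction l with
  | nil => intro s _; rfl
  | cons x t ih =>
    intro s hv
    by_cases hx : x = v
    · subst hx
      have hadd : PySem.Set.add s x = s := by
        simp [PySem.Set.add, PySem.Set.contains]; exact hv
      simp [hadd, ih s hv]
    · have hxne : (fun w => w ≠ v) x = true := by simpa using hx
      have hv' : v ∈ PySem.Set.add s x := by
        simp [PySem.Set.add]; split <;> simp [hv]
      simp only [List.foldl_cons, List.filter_cons, hxne]
      simpa using ih (PySem.Set.add s x) hv'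

-- first-occurrence dedup of v :: rest is v followed by the dedup of rest with v removed
theorem ofList_cons_filter (v : String) (rest : List String) :
    PySem.Set.ofList (v :: rest)
      = v :: PySem.Set.ofList (rest.filter (fun w => w ≠ v)) := by
  have h0 : PySem.Set.ofList (v :: rest) = rest.foldl PySem.Set.add [v] := by
    rw [PySem.Set.ofList_eq_foldl]; rfl
  have h1 : rest.foldl PySem.Set.add [v]
      = (rest.filter (fun w => w ≠ v)).foldl PySem.Set.add [v] :=
    pvFoldl_add_mem_filter rest v [v] (List.mem_singleton.mpr rfl)
  have h2 : v ∉ rest.filter (fun w => w ≠ v) := by simp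
  rw [h0, h1, pvFoldl_add_cons _ v h2, PySem.Set.ofList_eq_foldl]

-- B's recursive grouping computes Counter(l).items()
theorem pvGroup_eq_counter_items (l : List String) :
    pvGroup l = (PySem.Set.ofList l).map (fun k => (k, (l.count k : Int))) := by
  induction l using pvGroup.induct with
  | case1 => simp [pvGroup]
  | case2 v rest remaining ih =>
    have hrem : remaining = rest.filter (fun w => w ≠ v) := by
      simp only [remaining, List.unattach]
      have h := List.filter_map (f := fun x : {x // x ∈ rest} => x.val)
        (p := fun w : String => decide (w ≠ v)) (l := rest.attach)
      simp only [Function.comp_def] at h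
      rw [← h, List.attach_map_subtype_val]
    rw [hrem] at ih
    rw [pvGroup, ofList_cons_filter, List.map_cons]
    have hlen : rest.length = (rest.filter (fun w => w ≠ v)).length + rest.count v := by
      have h := List.length_eq_length_filter_add (l := rest) (fun w => decide (w ≠ v))
      have hc : (rest.filter (fun w => !decide (w ≠ v))).length = rest.count v := by
        simp only [List.count_eq_countP, List.countP_eq_length_filter]
        have hfun : (fun w : String => !decide (w ≠ v)) = (fun x : String => x == v) := by
          funext w; by_cases h : w = v <;> simp [h]
        rw [hfun]
      omega
    refine congrArg₂ (· :: ·) ?_ ?_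
    · refine congrArg (fun n : Int => (v, n)) ?_
      have h1 : (v :: rest).count v = rest.count v + 1 := by simp
      rw [h1]
      push_cast
      omega
    · rw [ih]
      refine List.map_congr_left (fun k hk => ?_)
      have hk' : k ∈ rest.filter (fun w => w ≠ v) := by
        simpa using (PySem.Set.mem_ofList _ _).mp hk
      have hkv : k ≠ v := by
        have := List.of_mem_filter hk'
        simpa using this
      have h1 : (v :: rest).count k = rest.count k := List.count_cons_of_ne (Ne.symm hkv)
      have h2 : (rest.filter (fun w => w ≠ v)).count k = rest.count k := by
        rw [List.count_filter]
        simp [hkv]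
      rw [h1, h2]

-- ===== VERDICT (by name: the statement is the Claim_ definition above) =====
theorem count_by_key_py_spec : Claim_equal_count_by_key_py := by
  intro items key _
  unfold Spec_count_by_key_py count_by_key_py count_by_key_py_alt
  rw [foldl_skip_eq_foldl_filterMap, PySem.Dict.foldl_insert_getD_add_one_eq_counter,
    PySem.Dict.items_counter, pvGroup_eq_counter_items]
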